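-- pv_equiv track=rewrite | github.com/CTSRD-CHERI/l3-cheri-mips-proofs | scripts/CheriStateComponents.py | combineStateComponents
-- ===== SOURCE A (Python) =====
-- def stateComponentsConflict(left, right):
--   sharedLength = min(len(left), len(right))
--   result = True
--   for i in range(0, sharedLength):
--     if (left[i] != right[i]):
--       result = False
--   return result
--
-- def combineStateComponents_aux(left, right):
--   result = []
--   for value1 in left:
--     conflictingValues = []
--     for value2 in right:
--       if stateComponentsConflict(value1, value2):
--         conflictingValues.append(value2)
--     if (len(conflictingValues) == 0):
--       # value1 does not conflict with any item in 'right'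
--       result.append(value1)
--     elif (len(conflictingValues) == 1):
--       if (len(value1) <= len(conflictingValues[0])):
--         # value1 is at least as general as value2
--         result.append(value1)
--     else:
--       # In this case value1 conflicts with multiple items
--       # i_0, ..., i_n in 'right'. Since we assume that no item in 'right'
--       # conflicts with another item in 'right', we know that i_0, ..., i_n
--       # don't conflict each other. Because they all conflict value1, this
--       # means that value1 is more general.
--       result.append(value1)
--   return result
--
-- def combineStateComponents(left, right):
--   if (left is None):
--     raise Exception("'left' is None")
--   if (right is None):
--     raise Exception("'right' is None")
--   left_filtered = combineStateComponents_aux(left, right)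
--   right_filtered = combineStateComponents_aux(right, left)
--   # Because these list might contain the same value, we
--   # check for duplicates.
--   result = []
--   result.extend(left_filtered)
--   for value in right_filtered:
--     if value not in left_filtered:
--       result.append(value)
--   return result
-- ===== SOURCE B (Python) =====
-- # Prefix-index rewrite: instead of comparing every pair of sequences, index one
-- # side by its sequences and by all their prefixes, then decide each sequence's
-- # fate from O(L) dictionary counts (strict prefix-ancestors / prefix-descendants).
-- def combineStateComponents(left, right):
--     def keep_filter(xs, ys):
--         seq_count = {}    # tuple(r) -> multiplicity of r in ys
--         for r in ys:
--             t = tuple(r)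
--             seq_count[t] = seq_count.get(t, 0) + 1
--         pref_count = {}   # p -> number of r in ys having p as a prefix (incl. r itself)
--         for r in ys:
--             t = tuple(r)
--             for i in range(len(t) + 1):
--                 p = t[:i]
--                 pref_count[p] = pref_count.get(p, 0) + 1
--         out = []
--         for v in xs:
--             t = tuple(v)
--             anc = sum(seq_count.get(t[:i], 0) for i in range(len(t)))
--             desc = pref_count.get(t, 0)
--             # drop v exactly when its sole prefix-compatible partner in ys
--             # is a single strictly shorter (more general) sequence
--             if not (anc == 1 and desc == 0):
--                 out.append(v)
--         return out
--     lf = keep_filter(left, right)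
--     rf = keep_filter(right, left)
--     seen = {tuple(v) for v in lf}
--     return lf + [v for v in rf if tuple(v) not in seen]
-- ===== Notes on version B (the rewrite author's own statement) =====
-- stated objective: faster
-- what changed: Replaces A's all-pairs element-by-element compatibility scan with dictionaries indexing one side's sequences and all of their prefixes, so each sequence is judged from O(L) hash lookups (strict prefix-ancestor count and prefix-descendant count), and the final dedup uses a set instead of repeated list membership.
import Mathlib
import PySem

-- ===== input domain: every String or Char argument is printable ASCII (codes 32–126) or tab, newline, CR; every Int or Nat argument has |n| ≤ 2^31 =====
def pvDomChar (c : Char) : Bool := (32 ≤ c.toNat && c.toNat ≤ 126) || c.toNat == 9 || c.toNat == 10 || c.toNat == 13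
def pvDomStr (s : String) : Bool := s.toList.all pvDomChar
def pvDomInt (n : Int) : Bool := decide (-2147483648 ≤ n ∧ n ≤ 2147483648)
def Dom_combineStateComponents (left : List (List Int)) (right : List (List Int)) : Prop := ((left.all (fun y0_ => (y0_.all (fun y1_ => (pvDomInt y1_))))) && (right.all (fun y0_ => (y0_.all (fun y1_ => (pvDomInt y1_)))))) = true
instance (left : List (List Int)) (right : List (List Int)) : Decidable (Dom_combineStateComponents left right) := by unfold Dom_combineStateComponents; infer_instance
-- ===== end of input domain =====

-- B replaces A's all-pairs prefix-compatibility scan by dictionaries indexing one side's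
-- sequences and all their prefixes, deciding each sequence from two dictionary counts.

-- ===== PORT A =====
def stateComponentsConflict (left right : List Int) : Bool :=
  (PySem.List.pyRange 0 ((min left.length right.length : Nat) : Int) 1).foldl
    (fun result i =>
      if PySem.List.pyGetD left i 0 ≠ PySem.List.pyGetD right i 0 then false else result)
    true

def combineStateComponents_aux (left right : List (List Int)) : List (List Int) :=
  left.foldl (fun result value1 =>
    let conflictingValues :=
      right.foldl (fun cv value2 =>
        if stateComponentsConflict value1 value2 then cv ++ [value2] else cv) []
    if conflictingValues.length = 0 then result ++ [value1]
    else if conflictingValues.length = 1 then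
      if value1.length ≤ (PySem.List.pyGetD conflictingValues 0 []).length then
        result ++ [value1]
      else result
    else result ++ [value1]) []

def combineStateComponents (left : List (List Int)) (right : List (List Int)) : List (List Int) :=
  let left_filtered := combineStateComponents_aux left right
  let right_filtered := combineStateComponents_aux right left
  let result := ([] : List (List Int)) ++ left_filtered
  right_filtered.foldl (fun res value => if value ∉ left_filtered then res ++ [value] else res) result

-- ===== PORT B =====
def pvSeqCount (ys : List (List Int)) : PySem.Dict (List Int) Int :=
  ys.foldl (fun d r => d.insert r (d.getD r 0 + 1)) PySem.Dict.empty

def pvPrefCount (ys : List (List Int)) : PySem.Dict (List Int) Int :=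
  ys.foldl (fun d r =>
    (List.range (r.length + 1)).foldl (fun d i => d.insert (r.take i) (d.getD (r.take i) 0 + 1)) d)
    PySem.Dict.empty

def pvKeepFilter (xs ys : List (List Int)) : List (List Int) :=
  let seqCount := pvSeqCount ys
  let prefCount := pvPrefCount ys
  xs.foldl (fun out v =>
    let anc := ((List.range v.length).map (fun i => seqCount.getD (v.take i) 0)).sum
    let desc := prefCount.getD v 0
    if ¬ (anc = 1 ∧ desc = 0) then out ++ [v] else out) []

def combineStateComponents_alt (left : List (List Int)) (right : List (List Int)) : List (List Int) :=
  let lf := pvKeepFilter left right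
  let rf := pvKeepFilter right left
  let seen := PySem.Set.ofList lf
  lf ++ rf.filter (fun v => !(PySem.Set.contains seen v))

-- ===== PRECONDITION & SPEC =====
def Spec_combineStateComponents (left : List (List Int)) (right : List (List Int)) (out : List (List Int)) : Prop := out = combineStateComponents_alt left right
instance (left : List (List Int)) (right : List (List Int)) (out : List (List Int)) : Decidable (Spec_combineStateComponents left right out) := by unfold Spec_combineStateComponents; infer_instance

-- ===== CLAIM (what is proved, stated in full; the proofs are below) =====
def Claim_equal_combineStateComponents : Prop := ∀ (left : List (List Int)) (right : List (List Int)), Dom_combineStateComponents left right → Spec_combineStateComponents left right (combineStateComponents left right)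

-- ===== LEMMAS AND PROOFS =====

-- the flag-clearing loop of stateComponentsConflict
lemma foldl_if_false {α : Type} (p : α → Prop) [DecidablePred p] (l : List α) (b : Bool) :
    l.foldl (fun res i => if p i then false else res) b = (b && decide (∀ i ∈ l, ¬ p i)) := by
  induction l generalizing b with
  | nil => simp
  | cons x t ih =>
    simp only [List.foldl_cons, ih]
    by_cases h : p x <;> simp [h]

lemma prefix_or_iff (a b : List Int) :
    (a <+: b ∨ b <+: a) ↔ ∀ k, k < min a.length b.length → a.getD k 0 = b.getD k 0 := by
  constructor
  · rintro (h | h) k hk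
    · have hk1 : k < a.length := lt_of_lt_of_le hk (min_le_left _ _)
      have hk2 : k < b.length := lt_of_lt_of_le hk (min_le_right _ _)
      rw [List.getD_eq_getElem _ _ hk1, List.getD_eq_getElem _ _ hk2]
      exact h.getElem hk1
    · have hk1 : k < a.length := lt_of_lt_of_le hk (min_le_left _ _)
      have hk2 : k < b.length := lt_of_lt_of_le hk (min_le_right _ _)
      rw [List.getD_eq_getElem _ _ hk1, List.getD_eq_getElem _ _ hk2]
      exact (h.getElem hk2).symm
  · intro h
    rcases le_total a.length b.length with hle | hle
    · left
      rw [List.prefix_iff_eq_take]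
      apply List.ext_getElem (by simp [hle])
      intro i h1 h2
      rw [List.getElem_take]
      have hi := h i (by omega)
      rwa [List.getD_eq_getElem _ _ (by omega), List.getD_eq_getElem _ _ (by omega)] at hi
    · right
      rw [List.prefix_iff_eq_take]
      apply List.ext_getElem (by simp [hle])
      intro i h1 h2
      rw [List.getElem_take]
      have hi := h i (by omega)
      rw [List.getD_eq_getElem _ _ (by omega), List.getD_eq_getElem _ _ (by omega)] at hi
      exact hi.symm

-- conflict = one list is a prefix of the other
lemma conflict_iff (a b : List Int) :
    stateComponentsConflict a b = true ↔ (a <+: b ∨ b <+: a) := by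
  unfold stateComponentsConflict
  rw [PySem.List.pyRange_zero_natCast, List.foldl_map, foldl_if_false]
  simp only [PySem.List.pyGetD_natCast, Bool.true_and, decide_eq_true_eq, List.mem_range,
    not_not]
  rw [prefix_or_iff]

def pvAncInt (ys : List (List Int)) (v : List Int) : Int :=
  ((List.range v.length).map (fun i => (pvSeqCount ys).getD (v.take i) 0)).sum

def pvDescInt (ys : List (List Int)) (v : List Int) : Int :=
  (pvPrefCount ys).getD v 0

lemma take_eq_iff (w x : List Int) (n : Nat) (hn : n ≤ w.length) :
    w.take n = x ↔ x <+: w ∧ x.length = n := by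
  constructor
  · rintro rfl
    exact ⟨List.take_prefix _ _, List.length_take_of_le hn⟩
  · rintro ⟨hpre, rfl⟩
    exact (List.prefix_iff_eq_take.mp hpre).symm

lemma countP_range_take (w x : List Int) (n : Nat) (hn : n ≤ w.length + 1) :
    (List.range n).countP (fun i => decide (w.take i = x)) =
      if x <+: w ∧ x.length < n then 1 else 0 := by
  induction n with
  | zero => simp
  | succ m ih =>
    rw [List.range_succ, List.countP_append, ih (by omega)]
    have hm : m ≤ w.length := by omega
    simp only [List.countP_cons, List.countP_nil, decide_eq_true_eq, take_eq_iff w x m hm]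
    by_cases hpre : x <+: w
    · by_cases hlen : x.length = m
      · have : ¬ x.length < m := by omega
        simp [hpre, hlen]
      · by_cases hlt : x.length < m <;> simp [hpre, hlen, hlt] <;> omega
    · simp [hpre]

lemma sum_count_take (ys : List (List Int)) (w : List Int) (n : Nat) (hn : n ≤ w.length + 1) :
    ((List.range n).map (fun i => (List.count (w.take i) ys : Int))).sum
      = (ys.countP (fun r => decide (r <+: w ∧ r.length < n)) : Int) := by
  induction ys with
  | nil => simp
  | cons r t ih =>
    simp only [List.count_cons, List.countP_cons, decide_eq_true_eq]
    push_cast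
    have hflip : ∀ i : Nat, (if (r == w.take i) = true then (1 : Int) else 0)
        = if w.take i = r then (1 : Int) else 0 := by
      intro i
      by_cases h : w.take i = r
      · simp [h]
      · have h' : ¬ (r = w.take i) := fun e => h e.symm
        simp [h, h']
    simp only [hflip]
    rw [PySem.List.sum_map_add_int (List.range n) (fun i => (List.count (w.take i) t : Int))
        (fun i => if w.take i = r then (1 : Int) else 0), ih]
    have h2 : ((List.range n).map (fun i => if w.take i = r then (1 : Int) else 0)).sum
        = ((List.range n).countP (fun i => decide (w.take i = r)) : Int) := by
      rw [← PySem.List.sum_map_ite_one_zero (fun i => decide (w.take i = r)) (List.range n)]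
      simp
    rw [h2, countP_range_take w r n hn]
    by_cases h : r <+: w ∧ r.length < n <;> simp [h]

lemma ancInt_eq (ys : List (List Int)) (v : List Int) :
    pvAncInt ys v = (ys.countP (fun r => decide (r <+: v ∧ r.length < v.length)) : Int) := by
  unfold pvAncInt pvSeqCount
  have h : ∀ i, (List.foldl (fun d x => d.insert x (d.getD x 0 + 1)) PySem.Dict.empty ys).getD (v.take i) 0
      = (List.count (v.take i) ys : Int) := by
    intro i
    rw [PySem.Dict.getD_foldl_insert_add_one]
    simp [PySem.Dict.getD_empty]
  simp only [h]
  exact sum_count_take ys v v.length (by omega)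

lemma getD_prefFold (ys : List (List Int)) (d : PySem.Dict (List Int) Int) (v : List Int) :
    (ys.foldl (fun d r =>
        (List.range (r.length + 1)).foldl
          (fun d i => d.insert (r.take i) (d.getD (r.take i) 0 + 1)) d) d).getD v 0
      = d.getD v 0 + (ys.countP (fun r => decide (v <+: r)) : Int) := by
  induction ys generalizing d with
  | nil => simp
  | cons r t ih =>
    rw [List.foldl_cons, ih, List.countP_cons]
    push_cast
    have hin : (List.range (r.length + 1)).foldl
        (fun d i => d.insert (r.take i) (d.getD (r.take i) 0 + 1)) d
        = ((List.range (r.length + 1)).map (fun i => r.take i)).foldl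
            (fun d x => d.insert x (d.getD x 0 + 1)) d := by
      rw [List.foldl_map]
    rw [hin, PySem.Dict.getD_foldl_insert_add_one]
    have hc : ((List.range (r.length + 1)).map (fun i => r.take i)).count v
        = (List.range (r.length + 1)).countP (fun i => decide (r.take i = v)) := by
      simp only [List.count, List.countP_map, Function.comp_def]
      exact List.countP_congr (fun i _ => by simp)
    rw [hc, countP_range_take r v (r.length + 1) (by omega)]
    by_cases h : v <+: r
    · have : v.length < r.length + 1 := by have := h.length_le; omega
      simp [h, this]
      ring
    · simp [h]

lemma descInt_eq (ys : List (List Int)) (v : List Int) :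
    pvDescInt ys v = (ys.countP (fun r => decide (v <+: r)) : Int) := by
  unfold pvDescInt pvPrefCount
  rw [getD_prefFold]
  simp [PySem.Dict.getD_empty]

-- the compatible elements split into strict ancestors and prefix-descendants
lemma countP_conflict_split (ys : List (List Int)) (v : List Int) :
    ys.countP (fun r => stateComponentsConflict v r) =
      ys.countP (fun r => decide (r <+: v ∧ r.length < v.length)) +
      ys.countP (fun r => decide (v <+: r)) := by
  induction ys with
  | nil => simp
  | cons r t ih =>
    simp only [List.countP_cons, ih, decide_eq_true_eq]
    have hc := conflict_iff v r
    by_cases h2 : v <+: r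
    · have h1 : ¬ (r <+: v ∧ r.length < v.length) := by
        rintro ⟨hp, hl⟩
        have := h2.length_le
        omega
      have hb : stateComponentsConflict v r = true := hc.mpr (Or.inl h2)
      simp [hb, h1, h2]
      omega
    · by_cases h1 : r <+: v ∧ r.length < v.length
      · have hb : stateComponentsConflict v r = true := hc.mpr (Or.inr h1.1)
        simp [hb, h1, h2]
        omega
      · have hb : ¬ (stateComponentsConflict v r = true) := by
          rw [hc]
          rintro (h | h)
          · exact h2 h
          · have hl := h.length_le
            have : r.length = v.length := by
              rcases Nat.lt_or_ge r.length v.length with hlt | hge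
              · exact absurd ⟨h, hlt⟩ h1
              · omega
            exact h2 ((h.eq_of_length this) ▸ List.prefix_refl v)
        simp [hb, h1, h2]

-- A's three-branch decision coincides with B's two-count decision
lemma decision_eq (ys : List (List Int)) (v : List Int) :
    (let cv := ys.filter (fun r => stateComponentsConflict v r)
     if cv.length = 0 then True
     else if cv.length = 1 then v.length ≤ (PySem.List.pyGetD cv 0 []).length
     else True)
    ↔ ¬ (pvAncInt ys v = 1 ∧ pvDescInt ys v = 0) := by
  have hanc := ancInt_eq ys v
  have hdesc := descInt_eq ys v
  set ancN := ys.countP (fun r => decide (r <+: v ∧ r.length < v.length)) with hancN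
  set descN := ys.countP (fun r => decide (v <+: r)) with hdescN
  have hR : (pvAncInt ys v = 1 ∧ pvDescInt ys v = 0) ↔ (ancN = 1 ∧ descN = 0) := by
    rw [hanc, hdesc]
    constructor
    · rintro ⟨h1, h2⟩
      exact ⟨by exact_mod_cast h1, by exact_mod_cast h2⟩
    · rintro ⟨h1, h2⟩
      exact ⟨by exact_mod_cast congrArg (Nat.cast : Nat → Int) h1,
             by exact_mod_cast congrArg (Nat.cast : Nat → Int) h2⟩
  rw [hR]
  set cv := ys.filter (fun r => stateComponentsConflict v r) with hcv
  have hlen : cv.length = ancN + descN := by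
    rw [hcv, ← List.countP_eq_length_filter, countP_conflict_split]
  by_cases h0 : cv.length = 0
  · have : ¬ (ancN = 1 ∧ descN = 0) := by omega
    simp [h0, this]
  · by_cases h1 : cv.length = 1
    · simp only [h1, if_true]
      obtain ⟨x, hx⟩ := List.length_eq_one_iff.mp h1
      have hx0 : PySem.List.pyGetD cv 0 [] = x := by
        rw [hx]
        simp [PySem.List.pyGetD]
      have hxmem : x ∈ cv := by simp [hx]
      have hxys : x ∈ ys := List.mem_of_mem_filter hxmem
      have hxconf : (v <+: x ∨ x <+: v) :=
        (conflict_iff v x).mp (List.of_mem_filter hxmem)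
      rw [hx0]
      constructor
      · rintro hle ⟨ha, hd⟩
        have hnopre : ∀ r ∈ ys, ¬ (v <+: r) := by
          intro r hr
          have := List.countP_eq_zero.mp hd r hr
          simpa using this
        rcases hxconf with h | h
        · exact hnopre x hxys h
        · have := h.length_le
          have hxe : x = v := h.eq_of_length (le_antisymm this hle)
          exact hnopre x hxys (hxe ▸ List.prefix_refl x)
      · intro hn
        have hd1 : descN = 1 := by
          rcases Nat.eq_zero_or_pos descN with h | h
          · exact absurd ⟨by omega, h⟩ hn
          · omega
        obtain ⟨r, hrys, hrpre⟩ := List.countP_pos_iff.mp (by omega : 0 < descN)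
        have hrpre' : v <+: r := by simpa using hrpre
        have hrcv : r ∈ cv := by
          rw [hcv]
          exact List.mem_filter_of_mem hrys ((conflict_iff v r).mpr (Or.inl hrpre'))
        have : r = x := by
          rw [hx] at hrcv
          simpa using hrcv
        exact this ▸ hrpre'.length_le
    · have : ¬ (ancN = 1 ∧ descN = 0) := by omega
      simp [h0, h1, this]

lemma aux_eq_keepFilter (xs ys : List (List Int)) :
    combineStateComponents_aux xs ys = pvKeepFilter xs ys := by
  unfold combineStateComponents_aux pvKeepFilter
  suffices h : ∀ acc : List (List Int),
      xs.foldl (fun result value1 =>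
        let conflictingValues :=
          ys.foldl (fun cv value2 =>
            if stateComponentsConflict value1 value2 then cv ++ [value2] else cv) []
        if conflictingValues.length = 0 then result ++ [value1]
        else if conflictingValues.length = 1 then
          if value1.length ≤ (PySem.List.pyGetD conflictingValues 0 []).length then
            result ++ [value1]
          else result
        else result ++ [value1]) acc
      = xs.foldl (fun out v =>
          let anc := ((List.range v.length).map (fun i => (pvSeqCount ys).getD (v.take i) 0)).sum
          let desc := (pvPrefCount ys).getD v 0
          if ¬ (anc = 1 ∧ desc = 0) then out ++ [v] else out) acc by
    exact h []
  intro acc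
  induction xs generalizing acc with
  | nil => rfl
  | cons v t ih =>
    simp only [List.foldl_cons]
    rw [ih]
    congr 1
    have hcv : ys.foldl (fun cv value2 =>
        if stateComponentsConflict v value2 then cv ++ [value2] else cv) []
        = ys.filter (fun r => stateComponentsConflict v r) := by
      rw [PySem.List.foldl_append_if_eq_filter]
      simp
    simp only [hcv]
    have hdec := decision_eq ys v
    simp only [] at hdec
    set cv := ys.filter (fun r => stateComponentsConflict v r) with hcvdef
    show (if cv.length = 0 then acc ++ [v]
          else if cv.length = 1 then
            if v.length ≤ (PySem.List.pyGetD cv 0 []).length then acc ++ [v] else acc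
          else acc ++ [v])
        = (if ¬ (pvAncInt ys v = 1 ∧ pvDescInt ys v = 0) then acc ++ [v] else acc)
    by_cases hB : (pvAncInt ys v = 1 ∧ pvDescInt ys v = 0)
    · have hnP : ¬ (if cv.length = 0 then True
          else if cv.length = 1 then v.length ≤ (PySem.List.pyGetD cv 0 []).length
          else True) := fun p => (hdec.mp p) hB
      have h1 : ¬ cv.length = 0 := fun h => hnP (by rw [if_pos h]; trivial)
      have h2 : cv.length = 1 := by
        by_contra h2
        exact hnP (by rw [if_neg h1, if_neg h2]; trivial)
      have h3 : ¬ (v.length ≤ (PySem.List.pyGetD cv 0 []).length) :=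
        fun hc => hnP (by rw [if_neg h1, if_pos h2]; exact hc)
      rw [if_neg h1, if_pos h2, if_neg h3, if_neg (not_not_intro hB)]
    · have hP := hdec.mpr hB
      rw [if_pos hB]
      by_cases h1 : cv.length = 0
      · rw [if_pos h1]
      · by_cases h2 : cv.length = 1
        · rw [if_neg h1, if_pos h2] at hP
          rw [if_neg h1, if_pos h2, if_pos hP]
        · rw [if_neg h1, if_neg h2]

-- ===== VERDICT (by name: the statement is the Claim_ definition above) =====
theorem combineStateComponents_spec : Claim_equal_combineStateComponents := by
  intro left right _
  unfold Spec_combineStateComponents combineStateComponents combineStateComponents_alt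
  rw [aux_eq_keepFilter left right, aux_eq_keepFilter right left]
  rw [PySem.List.foldl_append_ite_eq_filter]
  simp only [List.nil_append]
  congr 1
  apply List.filter_congr
  intro v _
  simp [PySem.Set.mem_ofList]
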